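-- pv_equiv track=rewrite | github.com/mlcclab/PyRAI2MD-hiam | tools/traj_analyzer.py | Paramread
-- ===== SOURCE A (Python) =====
-- def Paramread(param):
--     ## This function read the geometrical parameters from string or a file
--
--     p_list = ['B', 'A', 'D', 'D2', 'D3', 'DD', 'DD2', 'DD3', 'O', 'P', 'RMSD']
--     parameters = []
--     par_group = []
--
--     for n, p in enumerate(param):
--         if p in p_list:
--             if len(par_group) > 0:
--                 parameters.append(par_group)
--             par_group = [p]
--         else:
--             par_group.append(p)
--
--         if n == len(param) - 1:
--             parameters.append(par_group)
--
--     return parameters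
-- ===== SOURCE B (Python) =====
-- def Paramread(param):
--     ## Same grouping, built back-to-front: one pass over reversed input,
--     ## closing a group each time a marker keyword is reached.
--     p_list = ['B', 'A', 'D', 'D2', 'D3', 'DD', 'DD2', 'DD3', 'O', 'P', 'RMSD']
--     parameters = []
--     par_group = []
--     for p in reversed(param):
--         par_group.append(p)
--         if p in p_list:
--             parameters.append(par_group[::-1])
--             par_group = []
--     if len(par_group) > 0:
--         parameters.append(par_group[::-1])
--     parameters.reverse()
--     return parameters
-- ===== Notes on version B (the rewrite author's own statement) =====
-- stated objective: alternative
-- what changed: Replaces the forward loop with an enumerate index and a last-element check by a single pass over the reversed input that closes a group whenever a marker keyword is seen, flushing any leading non-marker prefix at the end.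
import Mathlib
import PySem

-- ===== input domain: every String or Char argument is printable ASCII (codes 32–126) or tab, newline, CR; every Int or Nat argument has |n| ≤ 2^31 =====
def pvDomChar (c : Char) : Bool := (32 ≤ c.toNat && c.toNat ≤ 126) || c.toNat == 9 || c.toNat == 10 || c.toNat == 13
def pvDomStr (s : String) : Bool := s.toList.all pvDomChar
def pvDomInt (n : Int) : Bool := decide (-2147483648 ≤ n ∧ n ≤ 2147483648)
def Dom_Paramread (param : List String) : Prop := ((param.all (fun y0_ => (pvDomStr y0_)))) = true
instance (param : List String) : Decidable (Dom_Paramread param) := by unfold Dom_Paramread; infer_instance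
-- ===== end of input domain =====

-- B builds the same grouping back-to-front in one pass over the reversed input (objective: alternative).

-- shared constant (the same literal p_list appears in both Pythons)
def pvPList : List String := ["B", "A", "D", "D2", "D3", "DD", "DD2", "DD3", "O", "P", "RMSD"]

-- ===== PORT A =====
-- A's for-loop over enumerate(param), as structural recursion on the same state
-- (n, parameters, par_group); `total` is len(param).
def paramLoopA (total : Nat) : Nat → List (List String) → List String → List String → List (List String)
  | _, parameters, _, [] => parameters
  | n, parameters, parGroup, p :: rest =>
    let st : List (List String) × List String :=
      if pvPList.contains p then
        ((if parGroup.length > 0 then parameters ++ [parGroup] else parameters), [p])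
      else (parameters, parGroup ++ [p])
    let st2 : List (List String) × List String :=
      if (n : Int) = (total : Int) - 1 then (st.1 ++ [st.2], st.2) else st
    paramLoopA total (n + 1) st2.1 st2.2 rest

def Paramread (param : List String) : List (List String) :=
  paramLoopA param.length 0 [] [] param

-- ===== PORT B =====
-- B's for-loop over reversed(param), state (parameters, par_group), appending and closing a
-- reversed group at each marker, plus the final flush and final reverse.
def Paramread_alt (param : List String) : List (List String) :=
  let st := param.reverse.foldl
    (fun (st : List (List String) × List String) p =>
      let parGroup := st.2 ++ [p]
      if pvPList.contains p then (st.1 ++ [parGroup.reverse], ([] : List String)) else (st.1, parGroup))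
    ([], [])
  let parameters := if st.2.length > 0 then st.1 ++ [st.2.reverse] else st.1
  parameters.reverse

-- ===== PRECONDITION & SPEC =====
def Spec_Paramread (param : List String) (out : List (List String)) : Prop := out = Paramread_alt param
instance (param : List String) (out : List (List String)) : Decidable (Spec_Paramread param out) := by unfold Spec_Paramread; infer_instance

-- ===== CLAIM (what is proved, stated in full; the proofs are below) =====
def Claim_equal_Paramread : Prop := ∀ (param : List String), Dom_Paramread param → Spec_Paramread param (Paramread param)

-- ===== LEMMAS AND PROOFS =====

-- canonical left-to-right grouping: `g` is the open group
def goAux (g : List String) : List String → List (List String)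
  | [] => [g]
  | p :: xs => if pvPList.contains p then g :: goAux [p] xs else goAux (g ++ [p]) xs

theorem goAux_nil (g : List String) : goAux g [] = [g] := rfl
theorem goAux_cons (g : List String) (p : String) (xs : List String) :
    goAux g (p :: xs) = if pvPList.contains p then g :: goAux [p] xs else goAux (g ++ [p]) xs := rfl

-- B's reversed fold in "forward-order" form: groups prepended, group elements prepended
def hAux : List String → List (List String) × List String
  | [] => ([], [])
  | p :: xs =>
    let st := hAux xs
    let cur := p :: st.2
    if pvPList.contains p then (cur :: st.1, ([] : List String)) else (st.1, cur)

-- B's reversed fold itself, as structural recursion (appends, reversed groups)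
def hAuxR : List String → List (List String) × List String
  | [] => ([], [])
  | p :: xs =>
    let st := hAuxR xs
    let cur := st.2 ++ [p]
    if pvPList.contains p then (st.1 ++ [cur.reverse], ([] : List String)) else (st.1, cur)

theorem hAuxR_eq (xs : List String) :
    hAuxR xs = ((hAux xs).1.reverse, (hAux xs).2.reverse) := by
  induction xs with
  | nil => rfl
  | cons p xs ih =>
    by_cases hp : p ∈ pvPList
    · simp [hAuxR, hAux, hp, ih]
    · simp [hAuxR, hAux, hp, ih]

-- one-step unfolding lemmas for A's loop (definitional)
theorem paramLoopA_nil (total n : Nat) (params : List (List String)) (group : List String) :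
    paramLoopA total n params group [] = params := rfl

theorem paramLoopA_cons (total n : Nat) (params : List (List String)) (group : List String)
    (p : String) (rest : List String) :
    paramLoopA total n params group (p :: rest) =
      (let st : List (List String) × List String :=
        if pvPList.contains p then
          ((if group.length > 0 then params ++ [group] else params), [p])
        else (params, group ++ [p])
      let st2 : List (List String) × List String :=
        if (n : Int) = (total : Int) - 1 then (st.1 ++ [st.2], st.2) else st
      paramLoopA total (n + 1) st2.1 st2.2 rest) := rfl

theorem foldl_reverse_hAuxR (xs : List String) :
    xs.reverse.foldl
      (fun (st : List (List String) × List String) p =>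
        let parGroup := st.2 ++ [p]
        if pvPList.contains p then (st.1 ++ [parGroup.reverse], ([] : List String)) else (st.1, parGroup))
      ([], []) = hAuxR xs := by
  rw [List.foldl_reverse]
  induction xs with
  | nil => rfl
  | cons p xs ih => rw [List.foldr_cons, ih]; rfl

theorem goAux_hAux (xs : List String) : ∀ g, goAux g xs = (g ++ (hAux xs).2) :: (hAux xs).1 := by
  induction xs with
  | nil => intro g; simp [goAux, hAux]
  | cons p xs ih =>
    intro g
    by_cases hp : p ∈ pvPList
    · simp [goAux, hAux, hp, ih]
    · simp [goAux, hAux, hp, ih]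

theorem paramLoopA_go (total : Nat) :
    ∀ (rest : List String) (n : Nat) (params : List (List String)) (group : List String),
      n + rest.length = total → rest ≠ [] → group ≠ [] →
      paramLoopA total n params group rest = params ++ goAux group rest := by
  intro rest
  induction rest with
  | nil => intro n params group _ hne _; exact absurd rfl hne
  | cons p rest ih =>
    intro n params group hlen _ hg
    have hglen : group.length > 0 := List.length_pos_iff.mpr hg
    rw [paramLoopA_cons]
    cases rest with
    | nil =>
      have hn : (n : Int) = (total : Int) - 1 := by simp at hlen; omega
      by_cases hp : p ∈ pvPList
      · simp [hp, hn, hglen, paramLoopA_nil, goAux_nil, goAux_cons]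
      · simp [hp, hn, paramLoopA_nil, goAux_nil, goAux_cons]
    | cons q rest' =>
      have hn : ¬ ((n : Int) = (total : Int) - 1) := by simp at hlen; omega
      have hlen' : (n + 1) + (q :: rest').length = total := by simp at hlen ⊢; omega
      by_cases hp : p ∈ pvPList
      · have key := ih (n + 1) (params ++ [group]) [p] hlen' (by simp) (by simp)
        rw [goAux_cons]
        simp [hp, hn, hglen, key]
      · have key := ih (n + 1) params (group ++ [p]) hlen' (by simp) (by simp)
        rw [goAux_cons]
        simp [hp, hn, key]

theorem Paramread_cons (x : String) (xs : List String) :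
    Paramread (x :: xs) = goAux [x] xs := by
  unfold Paramread
  rw [paramLoopA_cons]
  cases xs with
  | nil =>
    by_cases hp : x ∈ pvPList
    · simp [hp, paramLoopA_nil, goAux_nil]
    · simp [hp, paramLoopA_nil, goAux_nil]
  | cons q rest =>
    have key := paramLoopA_go (x :: q :: rest).length (q :: rest) 1 [] [x]
      (by simp; omega) (by simp) (by simp)
    have hn : ¬ ((0 : Int) = (rest.length : Int) + 1) := by omega
    simp only [List.length_cons] at key
    by_cases hp : x ∈ pvPList
    · simp [hp, hn, key]
    · simp [hp, hn, key]

theorem Paramread_alt_cons (x : String) (xs : List String) :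
    Paramread_alt (x :: xs) = (x :: (hAux xs).2) :: (hAux xs).1 := by
  unfold Paramread_alt
  rw [foldl_reverse_hAuxR (x :: xs), hAuxR_eq]
  by_cases hp : x ∈ pvPList
  · simp [hAux, hp]
  · simp [hAux, hp]

-- ===== VERDICT (by name: the statement is the Claim_ definition above) =====
theorem Paramread_spec : Claim_equal_Paramread := by
  intro param _
  unfold Spec_Paramread
  cases param with
  | nil => rfl
  | cons x xs =>
    rw [Paramread_cons, Paramread_alt_cons, goAux_hAux]
    simp
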